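-- pv_equiv track=rewrite | github.com/atakalive/gokrax | engine/fsm.py | _worst_risk
-- ===== SOURCE A (Python) =====
-- def _worst_risk(batch: list) -> str:
--     """バッチ内の全 Issue の domain_risk から最悪リスクを返す。
--
--     順序: n/a(-1) < none(0) < low(1) < high(2)
--     "n/a" は未判定、"none" は判定済みリスクなし。
--     空バッチの場合は "n/a"（未判定）を返す。
--     """
--     _RISK_ORDER = {"n/a": -1, "none": 0, "low": 1, "high": 2}
--     worst = "n/a"
--     for issue in batch:
--         a = issue.get("assessment", {})
--         ir = a.get("domain_risk", "n/a")
--         if _RISK_ORDER.get(ir, -1) > _RISK_ORDER.get(worst, -1):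
--             worst = ir
--     return worst
-- ===== SOURCE B (Python) =====
-- def _worst_risk(batch: list) -> str:
--     for level in ("high", "low", "none"):
--         if any(issue.get("assessment", {}).get("domain_risk", "n/a") == level
--                for issue in batch):
--             return level
--     return "n/a"
-- ===== Notes on version B (the rewrite author's own statement) =====
-- stated objective: alternative
-- what changed: Replaces A's single running-maximum accumulation pass (with a rank dictionary) by up to three short-circuiting presence scans over the batch in descending severity order, returning the first level found.
import Mathlib
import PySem

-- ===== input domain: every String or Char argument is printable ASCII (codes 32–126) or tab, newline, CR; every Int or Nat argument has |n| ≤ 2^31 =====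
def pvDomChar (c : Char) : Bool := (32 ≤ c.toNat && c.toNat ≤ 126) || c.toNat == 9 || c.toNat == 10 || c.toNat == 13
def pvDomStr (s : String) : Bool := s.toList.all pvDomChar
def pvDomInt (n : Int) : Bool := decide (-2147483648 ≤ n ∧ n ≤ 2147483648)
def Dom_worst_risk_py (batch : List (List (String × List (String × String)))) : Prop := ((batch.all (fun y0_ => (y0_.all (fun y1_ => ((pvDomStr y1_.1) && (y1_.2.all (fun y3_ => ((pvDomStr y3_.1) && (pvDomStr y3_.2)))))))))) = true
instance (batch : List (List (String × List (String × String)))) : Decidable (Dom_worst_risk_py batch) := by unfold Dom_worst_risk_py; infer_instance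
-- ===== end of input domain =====

-- B replaces A's running-maximum fold by up to three short-circuiting presence
-- scans over the batch, in descending severity order (objective: alternative).

-- ===== PORT A =====
-- _RISK_ORDER = {"n/a": -1, "none": 0, "low": 1, "high": 2}
def pvRiskOrder : PySem.Dict String Int :=
  PySem.Dict.mk [("n/a", -1), ("none", 0), ("low", 1), ("high", 2)]

-- the body of A's for-loop
def pvStepA (worst : String) (issue : List (String × List (String × String))) : String :=
  let a := PySem.Dict.getD (PySem.Dict.mk issue) "assessment" []
  let ir := PySem.Dict.getD (PySem.Dict.mk a) "domain_risk" "n/a"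
  if PySem.Dict.getD pvRiskOrder ir (-1) > PySem.Dict.getD pvRiskOrder worst (-1) then ir else worst

def worst_risk_py (batch : List (List (String × List (String × String)))) : String :=
  batch.foldl pvStepA "n/a"

-- ===== PORT B =====
-- issue.get("assessment", {}).get("domain_risk", "n/a")
def pvRiskB (issue : List (String × List (String × String))) : String :=
  PySem.Dict.getD (PySem.Dict.mk (PySem.Dict.getD (PySem.Dict.mk issue) "assessment" [])) "domain_risk" "n/a"

def worst_risk_py_alt (batch : List (List (String × List (String × String)))) : String :=
  match (["high", "low", "none"] : List String).find?
      (fun level => batch.any (fun issue => pvRiskB issue == level)) with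
  | some level => level
  | none => "n/a"

-- ===== PRECONDITION & SPEC =====
def Spec_worst_risk_py (batch : List (List (String × List (String × String)))) (out : String) : Prop := out = worst_risk_py_alt batch
instance (batch : List (List (String × List (String × String)))) (out : String) : Decidable (Spec_worst_risk_py batch out) := by unfold Spec_worst_risk_py; infer_instance

-- ===== CLAIM (what is proved, stated in full; the proofs are below) =====
def Claim_equal_worst_risk_py : Prop := ∀ (batch : List (List (String × List (String × String)))), Dom_worst_risk_py batch → Spec_worst_risk_py batch (worst_risk_py batch)


-- ===== LEMMAS AND PROOFS =====

def pvRnk (s : String) : Int := PySem.Dict.getD pvRiskOrder s (-1)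

theorem pvRnk_unfold (s : String) : pvRnk s =
    if "n/a" = s then -1 else if "none" = s then 0 else if "low" = s then 1
    else if "high" = s then 2 else -1 := by
  simp only [pvRnk, pvRiskOrder, PySem.Dict.getD_eq_get?_getD, PySem.Dict.get?_mk_cons,
    beq_iff_eq]
  split_ifs <;> simp_all [PySem.Dict.get?]

theorem pvRnk_cases (s : String) :
    pvRnk s = -1 ∨ pvRnk s = 0 ∨ pvRnk s = 1 ∨ pvRnk s = 2 := by
  rw [pvRnk_unfold]; split_ifs <;> simp

theorem pvRnk_eq_two_iff (s : String) : pvRnk s = 2 ↔ s = "high" := by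
  rw [pvRnk_unfold]; split_ifs <;> simp_all <;> first | exact Ne.symm ‹_› | (subst_vars; decide)

theorem pvRnk_eq_one_iff (s : String) : pvRnk s = 1 ↔ s = "low" := by
  rw [pvRnk_unfold]; split_ifs <;> simp_all <;> first | exact Ne.symm ‹_› | (subst_vars; decide)

theorem pvRnk_eq_zero_iff (s : String) : pvRnk s = 0 ↔ s = "none" := by
  rw [pvRnk_unfold]; split_ifs <;> simp_all <;> first | exact Ne.symm ‹_› | (subst_vars; decide)

-- canonical accumulator values of A's loop
def pvCanon (w : String) : Prop := w = "n/a" ∨ w = "none" ∨ w = "low" ∨ w = "high"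

-- the maximum rank occurring in the batch (−1 if empty)
def pvMx : List (List (String × List (String × String))) → Int
  | [] => -1
  | i :: t => max (pvRnk (pvRiskB i)) (pvMx t)

def pvToStr (n : Int) : String :=
  if n = 2 then "high" else if n = 1 then "low" else if n = 0 then "none" else "n/a"

theorem pvToStr_rnk (w : String) (h : pvCanon w) : pvToStr (pvRnk w) = w := by
  rcases h with h | h | h | h <;> subst h <;> decide

theorem pvMx_ge (l : List (List (String × List (String × String)))) : -1 ≤ pvMx l := by
  induction l with
  | nil => simp [pvMx]
  | cons i t ih => have := pvRnk_cases (pvRiskB i); simp only [pvMx]; omega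

theorem pvMx_le (l : List (List (String × List (String × String)))) : pvMx l ≤ 2 := by
  induction l with
  | nil => simp [pvMx]
  | cons i t ih => have := pvRnk_cases (pvRiskB i); simp only [pvMx]; omega

theorem pvMx_attained (l : List (List (String × List (String × String)))) (h : pvMx l ≠ -1) :
    ∃ i ∈ l, pvRnk (pvRiskB i) = pvMx l := by
  induction l with
  | nil => simp [pvMx] at h
  | cons i t ih =>
    simp only [pvMx] at h ⊢
    by_cases hc : pvMx t ≤ pvRnk (pvRiskB i)
    · exact ⟨i, by simp, by omega⟩
    · have ht : pvMx t ≠ -1 := by have := pvRnk_cases (pvRiskB i); omega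
      obtain ⟨j, hj, hjr⟩ := ih ht
      exact ⟨j, by simp [hj], by omega⟩

theorem pvMx_ub (l : List (List (String × List (String × String))))
    (i : List (String × List (String × String))) (h : i ∈ l) :
    pvRnk (pvRiskB i) ≤ pvMx l := by
  induction l with
  | nil => simp at h
  | cons j t ih =>
    simp only [pvMx]
    rcases List.mem_cons.mp h with h | h
    · subst h; omega
    · have := ih h; omega

theorem pvStepA_eq (w : String) (i : List (String × List (String × String))) :
    pvStepA w i = if pvRnk (pvRiskB i) > pvRnk w then pvRiskB i else w := rfl

theorem pvFoldA (l : List (List (String × List (String × String)))) :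
    ∀ w : String, pvCanon w → l.foldl pvStepA w = pvToStr (max (pvRnk w) (pvMx l)) := by
  induction l with
  | nil =>
    intro w hw
    have h1 : pvRnk w ≠ -1 ∨ pvRnk w = -1 := by tauto
    have := pvRnk_cases w
    have : max (pvRnk w) (pvMx ([] : List (List (String × List (String × String))))) = pvRnk w := by
      simp only [pvMx]; omega
    simp only [List.foldl_nil, this, pvToStr_rnk w hw]
  | cons i t ih =>
    intro w hw
    rw [List.foldl_cons, pvStepA_eq]
    by_cases h : pvRnk (pvRiskB i) > pvRnk w
    · have hnn : 0 ≤ pvRnk (pvRiskB i) := by have := pvRnk_cases w; omega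
      have hcan : pvCanon (pvRiskB i) := by
        rcases pvRnk_cases (pvRiskB i) with h0 | h0 | h0 | h0
        · omega
        · exact Or.inr (Or.inl ((pvRnk_eq_zero_iff _).mp h0))
        · exact Or.inr (Or.inr (Or.inl ((pvRnk_eq_one_iff _).mp h0)))
        · exact Or.inr (Or.inr (Or.inr ((pvRnk_eq_two_iff _).mp h0)))
      rw [if_pos h, ih _ hcan]
      congr 1
      simp only [pvMx]; omega
    · rw [if_neg h, ih _ hw]
      congr 1
      simp only [pvMx]; omega

theorem pvA_eq (l : List (List (String × List (String × String)))) :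
    worst_risk_py l = pvToStr (pvMx l) := by
  have h := pvFoldA l "n/a" (Or.inl rfl)
  have hr : pvRnk "n/a" = -1 := by decide
  have hm := pvMx_ge l
  have : max (pvRnk "n/a") (pvMx l) = pvMx l := by omega
  rw [worst_risk_py, h, this]

theorem pvAny_iff (l : List (List (String × List (String × String)))) (v : String) :
    (l.any (fun i => pvRiskB i == v) = true) ↔ ∃ i ∈ l, pvRiskB i = v := by
  simp [List.any_eq_true]

theorem pvB_eq (l : List (List (String × List (String × String)))) :
    worst_risk_py_alt l = pvToStr (pvMx l) := by
  rw [worst_risk_py_alt]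
  cases hH : l.any (fun i => pvRiskB i == "high") <;>
    cases hL : l.any (fun i => pvRiskB i == "low") <;>
      cases hN : l.any (fun i => pvRiskB i == "none")
  all_goals simp only [List.find?, hH, hL, hN]
  -- in the cases with a true level, pin down pvMx; in the all-false case pvMx = -1
  case false.false.false =>
    have hm : pvMx l = -1 := by
      by_contra hne
      obtain ⟨i, hi, hr⟩ := pvMx_attained l hne
      have := pvMx_ge l
      rcases pvRnk_cases (pvRiskB i) with h0 | h0 | h0 | h0
      · omega
      · exact absurd ((pvAny_iff l "none").mpr ⟨i, hi, (pvRnk_eq_zero_iff _).mp h0⟩) (by simp [hN])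
      · exact absurd ((pvAny_iff l "low").mpr ⟨i, hi, (pvRnk_eq_one_iff _).mp h0⟩) (by simp [hL])
      · exact absurd ((pvAny_iff l "high").mpr ⟨i, hi, (pvRnk_eq_two_iff _).mp h0⟩) (by simp [hH])
    rw [hm]; rfl
  case false.false.true =>
    obtain ⟨i, hi, hv⟩ := (pvAny_iff l "none").mp hN
    have h1 : 0 ≤ pvMx l := le_trans (by rw [(pvRnk_eq_zero_iff _).mpr hv]) (pvMx_ub l i hi)
    have h2 : pvMx l ≠ 1 := fun hc => by
      obtain ⟨j, hj, hr⟩ := pvMx_attained l (by omega)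
      exact absurd ((pvAny_iff l "low").mpr ⟨j, hj, (pvRnk_eq_one_iff _).mp (by omega)⟩) (by simp [hL])
    have h3 : pvMx l ≠ 2 := fun hc => by
      obtain ⟨j, hj, hr⟩ := pvMx_attained l (by omega)
      exact absurd ((pvAny_iff l "high").mpr ⟨j, hj, (pvRnk_eq_two_iff _).mp (by omega)⟩) (by simp [hH])
    have := pvMx_le l
    have hm : pvMx l = 0 := by omega
    rw [hm]; rfl
  case false.true.false | false.true.true =>
    obtain ⟨i, hi, hv⟩ := (pvAny_iff l "low").mp hL
    have h1 : 1 ≤ pvMx l := le_trans (by rw [(pvRnk_eq_one_iff _).mpr hv]) (pvMx_ub l i hi)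
    have h3 : pvMx l ≠ 2 := fun hc => by
      obtain ⟨j, hj, hr⟩ := pvMx_attained l (by omega)
      exact absurd ((pvAny_iff l "high").mpr ⟨j, hj, (pvRnk_eq_two_iff _).mp (by omega)⟩) (by simp [hH])
    have := pvMx_le l
    have hm : pvMx l = 1 := by omega
    rw [hm]; rfl
  all_goals {
    obtain ⟨i, hi, hv⟩ := (pvAny_iff l "high").mp hH
    have h1 : 2 ≤ pvMx l := le_trans (by rw [(pvRnk_eq_two_iff _).mpr hv]) (pvMx_ub l i hi)
    have := pvMx_le l
    have hm : pvMx l = 2 := by omega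
    rw [hm]; rfl }

-- ===== VERDICT (by name: the statement is the Claim_ definition above) =====
theorem worst_risk_py_spec : Claim_equal_worst_risk_py := by
  intro batch _
  unfold Spec_worst_risk_py
  rw [pvA_eq, pvB_eq]
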